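-- pv_equiv track=rewrite | github.com/AnudeeP-1/Codes | Infosys/Python Fundamentals/Day5/3.py | create_largest_number
-- ===== SOURCE A (Python) =====
-- def create_largest_number(number_list):
--     temp=0
--     new_list=""
--     for i in range(0,len(number_list)):
--         for j in range(i+1,len(number_list)):
--             if i<j:
--                 temp=number_list[i]
--                 number_list[i]=number_list[j]
--                 number_list[j]=temp
--     for i in number_list:
--         new_list=new_list+str(i)
--     return new_list
-- ===== SOURCE B (Python) =====
-- def create_largest_number(number_list):
--     i = 0
--     j = len(number_list) - 1
--     while i < j:
--         number_list[i], number_list[j] = number_list[j], number_list[i]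
--         i += 1
--         j -= 1
--     return ''.join(str(x) for x in number_list)
-- ===== Notes on version B (the rewrite author's own statement) =====
-- stated objective: faster
-- what changed: Replaced A's nested O(n^2) swap loops (which net to an in-place reversal) by a single two-pointer swap pass, and built the string with ''.join instead of repeated concatenation; the argument list is still left reversed in place.
import Mathlib
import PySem

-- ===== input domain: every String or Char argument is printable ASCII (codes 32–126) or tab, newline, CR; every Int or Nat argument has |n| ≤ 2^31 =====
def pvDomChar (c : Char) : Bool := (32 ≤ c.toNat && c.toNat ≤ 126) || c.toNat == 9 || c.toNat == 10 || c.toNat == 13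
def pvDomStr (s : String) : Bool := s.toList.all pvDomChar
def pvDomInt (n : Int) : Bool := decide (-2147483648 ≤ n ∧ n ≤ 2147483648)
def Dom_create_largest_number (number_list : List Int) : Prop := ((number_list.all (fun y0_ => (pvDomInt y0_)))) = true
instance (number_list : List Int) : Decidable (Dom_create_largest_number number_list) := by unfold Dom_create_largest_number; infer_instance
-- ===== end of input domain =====

-- B replaces A's nested O(n^2) swap loops by a single two-pointer reversal pass and joins
-- the pieces; equivalence is about the RETURN value only (both Pythons also leave the
-- argument list reversed in place).

-- ===== PORT A =====
-- temp=l[i]; l[i]=l[j]; l[j]=temp  (indices produced by range, always in bounds)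
def pySwapA (l : List Int) (i j : Nat) : List Int :=
  let temp := l.getD i 0
  let l1 := l.set i (l.getD j 0)
  l1.set j temp

def create_largest_number (number_list : List Int) : String :=
  let n := number_list.length
  let l := (List.range' 0 n).foldl
    (fun l i => (List.range' (i+1) (n - (i+1))).foldl
      (fun l j => if i < j then pySwapA l i j else l) l) number_list
  l.foldl (fun s x => s ++ PySem.Int.toStr x) ""

-- ===== PORT B =====
-- while i < j: swap l[i], l[j]; i += 1; j -= 1   (i, j are Python ints, j starts at len-1)
def twoPtr (l : List Int) (i j : Int) : List Int :=
  if h : i < j then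
    twoPtr ((l.set i.toNat (l.getD j.toNat 0)).set j.toNat (l.getD i.toNat 0)) (i+1) (j-1)
  else l
termination_by (j - i).toNat
decreasing_by omega

def create_largest_number_alt (number_list : List Int) : String :=
  let l := twoPtr number_list 0 ((number_list.length : Int) - 1)
  String.join (l.map PySem.Int.toStr)

-- ===== PRECONDITION & SPEC =====
def Spec_create_largest_number (number_list : List Int) (out : String) : Prop := out = create_largest_number_alt number_list
instance (number_list : List Int) (out : String) : Decidable (Spec_create_largest_number number_list out) := by unfold Spec_create_largest_number; infer_instance

-- ===== CLAIM (what is proved, stated in full; the proofs are below) =====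
def Claim_equal_create_largest_number : Prop := ∀ (number_list : List Int), Dom_create_largest_number number_list → Spec_create_largest_number number_list (create_largest_number number_list)

-- ===== LEMMAS AND PROOFS =====

theorem pv_getD_append (p : List Int) (a : Int) (s : List Int) (d : Int) :
    (p ++ a :: s).getD p.length d = a := by
  induction p with
  | nil => rfl
  | cons x p ih => simp

theorem pv_set_append (p : List Int) (a x : Int) (s : List Int) :
    (p ++ a :: s).set p.length x = p ++ x :: s := by
  induction p with
  | nil => rfl
  | cons y p ih => simp [ih]

-- A's inner loop, fully generalized: with pivot at position p.length, already-cycled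
-- block m, and remaining suffix s, the loop rotates the pivot through s.
theorem pv_inner (s : List Int) : ∀ (p m : List Int) (a : Int),
    (List.range' (p.length + 1 + m.length) s.length).foldl
      (fun l j => if p.length < j then pySwapA l p.length j else l)
      (p ++ a :: (m ++ s))
    = p ++ s.getLastD a :: (m ++ (a :: s).dropLast) := by
  induction s with
  | nil => intro p m a; simp
  | cons c s ih =>
    intro p m a
    simp only [List.length_cons]
    rw [List.range'_succ, List.foldl_cons]
    have hlt : p.length < p.length + 1 + m.length := by omega
    rw [if_pos hlt]
    have hswap : pySwapA (p ++ a :: (m ++ c :: s)) p.length (p.length + 1 + m.length)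
        = p ++ c :: ((m ++ [a]) ++ s) := by
      unfold pySwapA
      have h1 : (p ++ a :: (m ++ c :: s)) = (p ++ a :: m) ++ c :: s := by simp
      have hlen : (p ++ a :: m).length = p.length + 1 + m.length := by simp; omega
      rw [pv_getD_append p a (m ++ c :: s) 0]
      rw [h1, ← hlen, pv_getD_append (p ++ a :: m) c s 0]
      have h2 : (p ++ a :: m) ++ c :: s = p ++ a :: (m ++ c :: s) := by simp
      -- set position p.length (inside p ++ a :: …) to c
      rw [h2, pv_set_append p a c (m ++ c :: s)]
      -- set position (p ++ c :: m).length to a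
      have h3 : p ++ c :: (m ++ c :: s) = (p ++ c :: m) ++ c :: s := by simp
      have hlen3 : (p ++ a :: m).length = (p ++ c :: m).length := by simp
      rw [h3, hlen3, pv_set_append (p ++ c :: m) c a s]
      simp
    rw [hswap]
    have := ih p (m ++ [a]) c
    have harg : p.length + 1 + (m ++ [a]).length = p.length + 1 + m.length + 1 := by
      simp only [List.length_append, List.length_cons, List.length_nil]; omega
    rw [harg] at this
    rw [this, List.getLastD_cons, List.dropLast_cons₂]
    simp

theorem pv_last_drop (a : Int) (s : List Int) :
    s.getLastD a :: ((a :: s).dropLast).reverse = (a :: s).reverse := by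
  induction s generalizing a with
  | nil => rfl
  | cons c s ih =>
    have := ih c
    simp only [List.getLastD_cons, List.dropLast_cons₂, List.reverse_cons] at *
    simp [← this]

-- A's outer loop reverses the suffix in place.
theorem pv_outer (k : Nat) : ∀ (s p : List Int) (n : Nat), s.length = k → n = p.length + s.length →
    (List.range' p.length s.length).foldl
      (fun l i => (List.range' (i+1) (n - (i+1))).foldl
        (fun l j => if i < j then pySwapA l i j else l) l)
      (p ++ s)
    = p ++ s.reverse := by
  induction k using Nat.strong_induction_on with
  | _ k ih =>
    intro s p n hk hn
    rcases s with _ | ⟨a, s⟩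
    · simp
    · simp only [List.length_cons] at *
      rw [List.range'_succ, List.foldl_cons]
      have hcnt : n - (p.length + 1) = s.length := by omega
      have hinner := pv_inner s p [] a
      simp only [List.length_nil, List.nil_append, Nat.add_zero] at hinner
      rw [hcnt, hinner]
      have hdl : ((a :: s).dropLast).length = s.length := by simp
      have hlt : s.length < k := by omega
      have h := ih s.length hlt ((a :: s).dropLast) (p ++ [s.getLastD a]) n hdl
        (by simp; omega)
      have hsplit : p ++ s.getLastD a :: (a :: s).dropLast
          = (p ++ [s.getLastD a]) ++ (a :: s).dropLast := by simp
      have hl1 : p.length + 1 = (p ++ [s.getLastD a]).length := by simp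
      rw [hsplit, hl1, ← hdl, h]
      have hld := pv_last_drop a s
      simp [← hld]

-- B's two-pointer loop reverses the middle block.
theorem pv_twoPtr (k : Nat) : ∀ (mid u v : List Int), mid.length = k →
    twoPtr (u ++ mid ++ v) (u.length : Int) ((u.length : Int) + mid.length - 1)
    = u ++ mid.reverse ++ v := by
  induction k using Nat.strong_induction_on with
  | _ k ih =>
    intro mid u v hk
    rcases mid with _ | ⟨a, rest⟩
    · rw [twoPtr]; simp
    rcases rest.eq_nil_or_concat with rfl | ⟨m, b, rfl⟩
    · rw [twoPtr]; simp
    · simp only [List.concat_eq_append] at *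
      rw [twoPtr]
      have hlen : (a :: (m ++ [b])).length = m.length + 2 := by simp
      have hlt : (u.length : Int) < (u.length : Int) + (a :: (m ++ [b])).length - 1 := by
        rw [hlen]; push_cast; omega
      rw [dif_pos hlt]
      have hj : ((u.length : Int) + (a :: (m ++ [b])).length - 1).toNat
          = (u ++ a :: m).length := by rw [hlen]; simp; omega
      have hi : ((u.length : Int)).toNat = u.length := by simp
      have hsplit : u ++ (a :: (m ++ [b])) ++ v = (u ++ a :: m) ++ b :: v := by simp
      have hgj : (u ++ a :: (m ++ [b]) ++ v).getD ((u.length : Int) + (a :: (m ++ [b])).length - 1).toNat 0 = b := by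
        rw [hj, hsplit, pv_getD_append]
      have hgi : (u ++ a :: (m ++ [b]) ++ v).getD ((u.length : Int)).toNat 0 = a := by
        rw [hi]
        have : u ++ a :: (m ++ [b]) ++ v = u ++ a :: ((m ++ [b]) ++ v) := by simp
        rw [this, pv_getD_append]
      rw [hgj, hgi, hi, hj]
      have hset1 : (u ++ a :: (m ++ [b]) ++ v).set u.length b = u ++ b :: (m ++ [b]) ++ v := by
        have h1 : u ++ a :: (m ++ [b]) ++ v = u ++ a :: ((m ++ [b]) ++ v) := by simp
        rw [h1, pv_set_append]; simp
      rw [hset1]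
      have hset2 : (u ++ b :: (m ++ [b]) ++ v).set (u ++ a :: m).length a
          = u ++ b :: (m ++ [a]) ++ v := by
        have h1 : u ++ b :: (m ++ [b]) ++ v = (u ++ b :: m) ++ b :: v := by simp
        have h2 : (u ++ a :: m).length = (u ++ b :: m).length := by simp
        rw [h1, h2, pv_set_append]; simp
      rw [hset2]
      have hm : m.length < k := by rw [← hk]; simp
      have := ih m.length hm m (u ++ [b]) (a :: v) rfl
      have harg1 : ((u ++ [b]).length : Int) = (u.length : Int) + 1 := by simp
      have harg2 : ((u ++ [b]).length : Int) + (m.length : Int) - 1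
          = (u.length : Int) + (a :: (m ++ [b])).length - 1 - 1 := by
        rw [hlen]; push_cast; omega
      rw [harg2, harg1] at this
      have hlist : (u ++ [b]) ++ m ++ (a :: v) = u ++ b :: (m ++ [a]) ++ v := by simp
      rw [hlist] at this
      rw [this]
      simp

-- the two join loops agree
theorem pv_join (l : List Int) :
    l.foldl (fun s x => s ++ PySem.Int.toStr x) "" = String.join (l.map PySem.Int.toStr) := by
  rw [String.join, List.foldl_map]

-- ===== VERDICT (by name: the statement is the Claim_ definition above) =====
theorem create_largest_number_spec : Claim_equal_create_largest_number := by
  intro l _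
  unfold Spec_create_largest_number create_largest_number create_largest_number_alt
  have hA := pv_outer l.length l [] l.length rfl (by simp)
  simp only [List.length_nil, List.nil_append] at hA
  have hB := pv_twoPtr l.length l [] [] rfl
  simp only [List.length_nil, List.nil_append, List.append_nil, Nat.cast_zero, zero_add] at hB
  simp only [hA, hB, pv_join]
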